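-- pv_equiv track=rewrite | github.com/vthost/retroeval | retroeval/utils/metrics.py | maxfrag_k
-- ===== SOURCE A (Python) =====
-- def maxfrag_k(t_react, p_reacts, ks=[1, 5, 10]):
--     ks = sorted(ks)
--     mf_ks = [0]*len(ks)
--
--     t_react_ind = t_react.split(".")
--     lens = [len(ri) for ri in t_react_ind]
--     t_react_maxfrag = t_react_ind[lens.index(max(lens))]  # NOTE we take the first. one could check all.
--
--     for i, k in enumerate(ks):
--         p_reacts_frag = [r_pred.split(".") for r_pred in p_reacts[ks[i-1] if i else 0:k]]
--         occurs = any([t_react_maxfrag in p_reacts_frag_j for p_reacts_frag_j in p_reacts_frag])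
--         if occurs:
--             mf_ks[i] = 1
--             if k < ks[-1]:
--                 for j, k2 in enumerate(ks[i+1:]):
--                     mf_ks[i+1+j] = 1
--             break
--     return mf_ks
-- ===== SOURCE B (Python) =====
-- def maxfrag_k(t_react, p_reacts, ks=[1, 5, 10]):
--     # target = the first longest fragment of t_react
--     target = max(t_react.split("."), key=len)
--     # single scan: position of the first prediction containing the target, or None
--     pos = None
--     for i, p in enumerate(p_reacts):
--         if target in p.split("."):
--             pos = i
--             break
--     return [1 if pos is not None and pos < k else 0 for k in sorted(ks)]
-- ===== Notes on version B (the rewrite author's own statement) =====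
-- stated objective: simpler
-- what changed: Replaces A's partitioning of the prediction list into consecutive k-slices with early break and forward 1-propagation by one linear scan for the index of the first prediction containing the max fragment, followed by a simple pos<k threshold per sorted cutoff.
-- intended difference: When the largest cutoff m occurs more than once in ks and the first prediction containing the max fragment lies at a position in [t, m) (t = largest smaller cutoff, 0 if none), A returns 1 only for the first copy of m and 0 for the later copies, while B returns 1 for every copy of m; B's is intended since equal cutoffs must receive equal scores. — e.g. on maxfrag_k("a", ["a"], [2, 2]): A returns [1, 0], B returns [1, 1]
-- outside the precondition, e.g. on maxfrag_k('a', ['a', 'b'], [-1]): A returns [1], B returns [0]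
import Mathlib
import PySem

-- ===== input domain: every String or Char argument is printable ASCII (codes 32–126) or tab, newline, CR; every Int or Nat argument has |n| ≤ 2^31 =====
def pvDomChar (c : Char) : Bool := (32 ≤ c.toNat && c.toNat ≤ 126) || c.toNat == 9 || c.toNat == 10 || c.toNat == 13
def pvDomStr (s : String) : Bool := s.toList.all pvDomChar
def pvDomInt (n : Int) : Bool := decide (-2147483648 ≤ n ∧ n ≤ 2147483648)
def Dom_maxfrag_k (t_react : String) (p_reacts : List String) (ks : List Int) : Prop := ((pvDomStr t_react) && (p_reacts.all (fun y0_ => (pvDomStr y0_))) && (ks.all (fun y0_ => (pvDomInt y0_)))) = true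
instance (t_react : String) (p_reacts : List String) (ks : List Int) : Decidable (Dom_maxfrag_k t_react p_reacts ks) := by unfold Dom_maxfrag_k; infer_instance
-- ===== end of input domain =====

-- B replaces A's consecutive k-slice partitioning with early break and forward 1-propagation
-- by a single first-hit scan plus a pos<k threshold per sorted cutoff (objective: simpler).


-- r.split(".") — the separator "." is a nonempty literal, so PySem.Str.split? is always `some`
def pvSplitDot (r : String) : List String := (PySem.Str.split? r ".").getD []

-- ===== PORT A =====
-- A's for-loop over enumerate(sorted ks) with break: prev carries `ks[i-1] if i else 0`;
-- the untouched tail of the preallocated zero list is `replicate _ 0`, the inner 1-fill is `replicate _ 1`.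
def pvALoop (target : String) (p_reacts : List String) (lastK : Int) : Int → List Int → List Int
  | _, [] => []
  | prev, k :: rest =>
    let frag := (PySem.List.slice p_reacts (some prev) (some k)).map (fun r => pvSplitDot r)
    if frag.any (fun fr => fr.contains target) then
      1 :: (if k < lastK then List.replicate rest.length 1 else List.replicate rest.length 0)
    else
      0 :: pvALoop target p_reacts lastK k rest

def maxfrag_k (t_react : String) (p_reacts : List String) (ks : List Int) : List Int :=
  let ks' := PySem.List.sorted ks (fun x => x)
  let ind := pvSplitDot t_react
  let lens := ind.map (fun ri => PySem.Str.len ri)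
  let tgt := PySem.List.pyGetD ind
    (((PySem.List.index? lens ((PySem.List.max? lens (fun x => x)).getD 0)).getD 0 : Nat) : Int) ""
  pvALoop tgt p_reacts (PySem.List.pyGetD ks' (-1) 0) 0 ks'

-- ===== PORT B =====
-- max(t_react.split("."), key=len): Python max keeps the FIRST maximal element, as PySem.List.max? does
def pvTarget (t_react : String) : String :=
  (PySem.List.max? (pvSplitDot t_react) (fun f => PySem.Str.len f)).getD ""

-- Source B's enumerate loop with break: index of the first prediction containing target
def pvFirstHit (target : String) : Nat → List String → Option Nat
  | _, [] => none
  | i, p :: rest => if (pvSplitDot p).contains target then some i else pvFirstHit target (i + 1) rest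

def maxfrag_k_alt (t_react : String) (p_reacts : List String) (ks : List Int) : List Int :=
  let pos := pvFirstHit (pvTarget t_react) 0 p_reacts
  (PySem.List.sorted ks (fun x => x)).map (fun k =>
    match pos with
    | some q => if (q : Int) < k then 1 else 0
    | none => 0)

-- ===== PRECONDITION & SPEC =====
-- Pre_ restricts to the metric's natural domain: cutoffs are non-negative counts; on a negative k
-- Python's slice p_reacts[...:k] wraps around the end of the list, which the top-k reading never means.
def Pre_maxfrag_k (t_react : String) (p_reacts : List String) (ks : List Int) : Prop :=
  ∀ k ∈ ks, 0 ≤ k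
instance (t_react : String) (p_reacts : List String) (ks : List Int) : Decidable (Pre_maxfrag_k t_react p_reacts ks) := by unfold Pre_maxfrag_k; infer_instance

def pvWitness_maxfrag_k : String × List String × List Int := ("a.bb", ["c", "bb"], [1, 2])



-- When the largest cutoff m occurs more than once in ks and the first prediction containing the max
-- fragment lies at a position in [t, m) (t = largest smaller cutoff, 0 if none), A returns 1 only for the
-- first copy of m and 0 for the later copies, while B returns 1 for every copy of m; B's is intended
-- since equal cutoffs must receive equal scores.
-- (tg is the first longest '.'-fragment of t_react; m the largest cutoff; the condition says: m is
-- duplicated, some prediction among the first m contains tg, and none below any smaller cutoff does)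
def D_maxfrag_k (t_react : String) (p_reacts : List String) (ks : List Int) : Prop :=
  let m := ks.foldl max 0
  let tg := (PySem.List.max? (pvSplitDot t_react) PySem.Str.len).getD ""
  1 < ks.count m ∧
  (∃ r ∈ p_reacts.take m.toNat, tg ∈ pvSplitDot r) ∧
  (∀ k ∈ ks, k < m → ∀ r ∈ p_reacts.take k.toNat, tg ∉ pvSplitDot r)
instance (t_react : String) (p_reacts : List String) (ks : List Int) : Decidable (D_maxfrag_k t_react p_reacts ks) := by unfold D_maxfrag_k; infer_instance

def Spec_maxfrag_k (t_react : String) (p_reacts : List String) (ks : List Int) (out : List Int) : Prop :=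
  ¬ D_maxfrag_k t_react p_reacts ks → out = maxfrag_k_alt t_react p_reacts ks
instance (t_react : String) (p_reacts : List String) (ks : List Int) (out : List Int) : Decidable (Spec_maxfrag_k t_react p_reacts ks out) := by unfold Spec_maxfrag_k; infer_instance

def pvDiffWitness_maxfrag_k : String × List String × List Int := ("a", ["a"], [2, 2])
def pvDiffWitnessOut_maxfrag_k : (List Int) × (List Int) := ([1, 0], [1, 1])

-- ===== CLAIM (what is proved, stated in full; the proofs are below) =====
def Claim_unchanged_maxfrag_k : Prop := ∀ (t_react : String) (p_reacts : List String) (ks : List Int), Dom_maxfrag_k t_react p_reacts ks → Pre_maxfrag_k t_react p_reacts ks → Spec_maxfrag_k t_react p_reacts ks (maxfrag_k t_react p_reacts ks)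
def Claim_changed_maxfrag_k : Prop := Dom_maxfrag_k (pvDiffWitness_maxfrag_k.1) (pvDiffWitness_maxfrag_k.2.1) (pvDiffWitness_maxfrag_k.2.2) ∧ Pre_maxfrag_k (pvDiffWitness_maxfrag_k.1) (pvDiffWitness_maxfrag_k.2.1) (pvDiffWitness_maxfrag_k.2.2) ∧ D_maxfrag_k (pvDiffWitness_maxfrag_k.1) (pvDiffWitness_maxfrag_k.2.1) (pvDiffWitness_maxfrag_k.2.2) ∧ maxfrag_k (pvDiffWitness_maxfrag_k.1) (pvDiffWitness_maxfrag_k.2.1) (pvDiffWitness_maxfrag_k.2.2) = pvDiffWitnessOut_maxfrag_k.1 ∧ maxfrag_k_alt (pvDiffWitness_maxfrag_k.1) (pvDiffWitness_maxfrag_k.2.1) (pvDiffWitness_maxfrag_k.2.2) = pvDiffWitnessOut_maxfrag_k.2 ∧ pvDiffWitnessOut_maxfrag_k.1 ≠ pvDiffWitnessOut_maxfrag_k.2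
def Claim_exact_maxfrag_k : Prop := ∀ (t_react : String) (p_reacts : List String) (ks : List Int), Dom_maxfrag_k t_react p_reacts ks → Pre_maxfrag_k t_react p_reacts ks → D_maxfrag_k t_react p_reacts ks → maxfrag_k t_react p_reacts ks ≠ maxfrag_k_alt t_react p_reacts ks

-- ===== LEMMAS AND PROOFS =====

-- proof-side helpers: the maximum cutoff and the largest cutoff below it (0 if none)
def pvMaxKs : List Int → Int
  | [] => 0
  | k :: t => t.foldl max k
def pvPrevK (ks : List Int) : Int := (ks.filter (fun x => x < pvMaxKs ks)).foldl max 0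

-- the per-prediction test both programs perform
def pvHit (target : String) (r : String) : Bool := (pvSplitDot r).contains target

theorem pv_max?_cons2 (key : String → Int) (a x : String) (l : List String) :
    PySem.List.max? (a :: x :: l) key = PySem.List.max? ((if key a < key x then x else a) :: l) key := by
  simp only [PySem.List.max?, List.foldl_cons]
  split_ifs with h <;> simp [h]

theorem pv_max?_map_cons (l : List String) : ∀ a : String,
    PySem.List.max? ((a :: l).map (fun r => PySem.Str.len r)) (fun x => x) =
      (PySem.List.max? (a :: l) (fun r => PySem.Str.len r)).map (fun r => PySem.Str.len r) := by
  induction l with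
  | nil => intro a; rfl
  | cons x t ih =>
    intro a
    have h1 : (a :: x :: t).map (fun r => PySem.Str.len r) =
        PySem.Str.len a :: PySem.Str.len x :: t.map (fun r => PySem.Str.len r) := rfl
    rw [h1, pv_max?_cons2 (fun r => PySem.Str.len r) a x t]
    have h2 : PySem.List.max? (PySem.Str.len a :: PySem.Str.len x :: t.map (fun r => PySem.Str.len r)) (fun y => y)
        = PySem.List.max? ((if PySem.Str.len a < PySem.Str.len x then PySem.Str.len x else PySem.Str.len a) :: t.map (fun r => PySem.Str.len r)) (fun y => y) := by
      simp only [PySem.List.max?, List.foldl_cons]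
      split_ifs with h <;> simp [h]
    rw [h2]
    have h3 : (if PySem.Str.len a < PySem.Str.len x then PySem.Str.len x else PySem.Str.len a)
        = PySem.Str.len (if PySem.Str.len a < PySem.Str.len x then x else a) := by
      split_ifs <;> rfl
    rw [h3]
    exact ih (if PySem.Str.len a < PySem.Str.len x then x else a)

theorem pv_max?_first_aux (l : List String) : ∀ a : String,
    (PySem.List.max? (a :: l) (fun r => PySem.Str.len r) = some a ∧
      ∀ x ∈ l, PySem.Str.len x ≤ PySem.Str.len a) ∨
    (∃ r pre suf, PySem.List.max? (a :: l) (fun r => PySem.Str.len r) = some r ∧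
      l = pre ++ r :: suf ∧ PySem.Str.len a < PySem.Str.len r ∧
      ∀ x ∈ pre, PySem.Str.len x < PySem.Str.len r) := by
  induction l with
  | nil => intro a; left; exact ⟨rfl, by simp⟩
  | cons x t ih =>
    intro a
    rw [pv_max?_cons2 (fun r => PySem.Str.len r) a x t]
    by_cases hax : PySem.Str.len a < PySem.Str.len x
    · rw [if_pos hax]
      rcases ih x with ⟨hm, hle⟩ | ⟨r, pre, suf, hm, hdec, hlt, hpre⟩
      · right
        exact ⟨x, [], t, hm, rfl, hax, by simp⟩
      · right
        refine ⟨r, x :: pre, suf, hm, by rw [hdec, List.cons_append], lt_trans hax hlt, ?_⟩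
        intro y hy
        rcases List.mem_cons.1 hy with rfl | hy
        · exact hlt
        · exact hpre y hy
    · rw [if_neg hax]
      rcases ih a with ⟨hm, hle⟩ | ⟨r, pre, suf, hm, hdec, hlt, hpre⟩
      · left
        refine ⟨hm, ?_⟩
        intro y hy
        rcases List.mem_cons.1 hy with rfl | hy
        · omega
        · exact hle y hy
      · right
        refine ⟨r, x :: pre, suf, hm, by rw [hdec, List.cons_append], hlt, ?_⟩
        intro y hy
        rcases List.mem_cons.1 hy with rfl | hy
        · omega
        · exact hpre y hy

theorem pv_max?_first (l : List String) (m : String)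
    (h : PySem.List.max? l (fun r => PySem.Str.len r) = some m) :
    ∃ pre suf, l = pre ++ m :: suf ∧ ∀ x ∈ pre, PySem.Str.len x < PySem.Str.len m := by
  cases l with
  | nil => simp [PySem.List.max?] at h
  | cons a t =>
    rcases pv_max?_first_aux t a with ⟨hm, _⟩ | ⟨r, pre, suf, hm, hdec, _, hpre⟩
    · rw [hm] at h
      obtain rfl : a = m := Option.some.inj h
      exact ⟨[], t, rfl, by simp⟩
    · rw [hm] at h
      obtain rfl : r = m := Option.some.inj h
      exact ⟨a :: pre, suf, by rw [hdec, List.cons_append], by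
        intro y hy
        rcases List.mem_cons.1 hy with rfl | hy
        · omega
        · exact hpre y hy⟩

theorem pv_mem_of_getD_take (l : List String) (n b : Nat) (hb : b < (l.take n).length)
    (x : String) (h : (l.take n)[b] = x) : x = l.getD b "" := by
  have hbl : b < l.length := lt_of_lt_of_le hb (by simp)
  rw [← h, List.getElem_take, List.getD_eq_getElem _ _ hbl]

-- A's first-argmax of the fragment lengths equals B's max?-with-key target-- A's first-argmax of the fragment lengths equals B's max?-with-key target
theorem pv_target_eq (t_react : String) :
    PySem.List.pyGetD (pvSplitDot t_react)
      (((PySem.List.index? ((pvSplitDot t_react).map (fun ri => PySem.Str.len ri))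
          ((PySem.List.max? ((pvSplitDot t_react).map (fun ri => PySem.Str.len ri)) (fun x => x)).getD 0)).getD 0 : Nat) : Int) ""
      = pvTarget t_react := by
  rcases eq_or_ne (pvSplitDot t_react) [] with h | h
  · rw [pvTarget, h]; rfl
  · obtain ⟨m, hm⟩ : ∃ m, PySem.List.max? (pvSplitDot t_react) (fun r => PySem.Str.len r) = some m := by
      cases hmm : PySem.List.max? (pvSplitDot t_react) (fun r => PySem.Str.len r) with
      | none => exact absurd ((PySem.List.max?_eq_none_iff _ _).1 hmm) h
      | some m => exact ⟨m, rfl⟩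
    obtain ⟨pre, suf, hdec, hpre⟩ := pv_max?_first _ m hm
    have hmap : PySem.List.max? ((pvSplitDot t_react).map (fun ri => PySem.Str.len ri)) (fun x => x)
        = some (PySem.Str.len m) := by
      cases hL : pvSplitDot t_react with
      | nil => exact absurd hL h
      | cons a t =>
        rw [pv_max?_map_cons t a, ← hL, hm]; rfl
    rw [hmap]
    have hidx : PySem.List.index? ((pvSplitDot t_react).map (fun ri => PySem.Str.len ri))
        (PySem.Str.len m) = some pre.length := by
      rw [PySem.List.index?_eq_some_iff]
      refine ⟨pre.map (fun ri => PySem.Str.len ri), suf.map (fun ri => PySem.Str.len ri), ?_, by simp, ?_⟩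
      · rw [hdec]; simp
      · intro hmem
        obtain ⟨x, hx, hlen⟩ := List.mem_map.1 hmem
        have := hpre x hx
        omega
    rw [Option.getD_some, hidx, Option.getD_some, PySem.List.pyGetD_natCast, hdec]
    rw [pvTarget, hm, Option.getD_some]
    rw [List.getD, List.getElem?_append_right (le_refl pre.length)]
    simp

theorem pv_fh_shift (tgt : String) (l : List String) (i : Nat) :
    pvFirstHit tgt i l = (pvFirstHit tgt 0 l).map (fun q => i + q) := by
  induction l generalizing i with
  | nil => simp [pvFirstHit]
  | cons x rest ih =>
    by_cases h : tgt ∈ pvSplitDot x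
    · simp [pvFirstHit, h]
    · simp only [pvFirstHit, List.contains_eq_mem, h, decide_false, Bool.false_eq_true, ↓reduceIte]
      rw [ih (i + 1), ih 1]
      cases pvFirstHit tgt 0 rest <;> simp <;> omega

theorem pv_fh_take (tgt : String) (l : List String) (n : Nat) :
    (l.take n).any (pvHit tgt) =
      (match pvFirstHit tgt 0 l with
       | none => false
       | some q => decide (q < n)) := by
  induction l generalizing n with
  | nil => cases n <;> simp [pvFirstHit]
  | cons x rest ih =>
    cases n with
    | zero =>
      simp only [List.take_zero, List.any_nil]
      cases h : pvFirstHit tgt 0 (x :: rest) <;> simp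
    | succ n =>
      by_cases h : tgt ∈ pvSplitDot x
      · simp [pvFirstHit, pvHit, h]
      · simp only [List.take_succ_cons, List.any_cons, pvHit, List.contains_eq_mem, h,
          decide_false, Bool.false_or, pvFirstHit, Bool.false_eq_true, ↓reduceIte]
        rw [ih n, pv_fh_shift tgt rest 1]
        cases pvFirstHit tgt 0 rest <;> simp <;> omega

theorem pv_fh_spec (tgt : String) (p : List String) (q : Nat)
    (h : pvFirstHit tgt 0 p = some q) :
    q < p.length ∧ pvHit tgt (p.getD q "") = true ∧ ∀ j < q, pvHit tgt (p.getD j "") = false := by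
  induction p generalizing q with
  | nil => simp [pvFirstHit] at h
  | cons x rest ih =>
    by_cases hx : tgt ∈ pvSplitDot x
    · have h0 : pvFirstHit tgt 0 (x :: rest) = some 0 := by simp [pvFirstHit, hx]
      rw [h0] at h
      obtain rfl : (0 : Nat) = q := Option.some.inj h
      exact ⟨by simp, by simp [pvHit, hx], by omega⟩
    · have hstep : pvFirstHit tgt 0 (x :: rest) = (pvFirstHit tgt 0 rest).map (fun q => 1 + q) := by
        simp only [pvFirstHit, List.contains_eq_mem, hx, decide_false, Bool.false_eq_true, ↓reduceIte]
        exact pv_fh_shift tgt rest 1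
      rw [hstep] at h
      cases hfr : pvFirstHit tgt 0 rest with
      | none => rw [hfr] at h; cases h
      | some q' =>
        rw [hfr] at h
        obtain rfl : 1 + q' = q := Option.some.inj h
        obtain ⟨h1, h2, h3⟩ := ih q' hfr
        rw [Nat.add_comm 1 q']
        refine ⟨by simp; omega, by simpa [List.getD_cons_succ] using h2, ?_⟩
        intro j hj
        cases j with
        | zero => simp [pvHit, hx]
        | succ j => simpa [List.getD_cons_succ] using h3 j (by omega)

theorem pv_take_any_split (p : List String) (h : String → Bool) {a b : Int} (h0 : 0 ≤ a) (hab : a ≤ b) :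
    (p.take b.toNat).any h =
      ((p.take a.toNat).any h || (PySem.List.slice p (some a) (some b)).any h) := by
  have hb : 0 ≤ b := le_trans h0 hab
  have h1 : b.toNat = a.toNat + (b.toNat - a.toNat) := by omega
  rw [PySem.List.slice_toNat p h0 hb, ← List.any_append, ← List.take_add, ← h1]

theorem pv_maxKs_isMax (ks : List Int) : ∀ x ∈ ks, x ≤ pvMaxKs ks := by
  cases ks with
  | nil => simp
  | cons k t =>
    intro x hx
    rcases List.mem_cons.1 hx with rfl | hx
    · exact (PySem.List.le_foldl_max t x).1
    · exact (PySem.List.le_foldl_max t k).2 x hx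

theorem pv_maxKs_mem (ks : List Int) (h : ks ≠ []) : pvMaxKs ks ∈ ks := by
  cases ks with
  | nil => exact absurd rfl h
  | cons k t =>
    show t.foldl max k ∈ k :: t
    rcases PySem.List.foldl_max_mem t k with h' | h'
    · rw [h']; exact List.mem_cons_self
    · exact List.mem_cons_of_mem _ h'

theorem pv_pairwise_le_getLast (l : List Int) (hp : l.Pairwise (· ≤ ·)) :
    ∀ x ∈ l, ∀ g, l.getLast? = some g → x ≤ g := by
  induction l with
  | nil => simp
  | cons a t ih =>
    intro x hx g hg
    cases t with
    | nil =>
      simp at hg hx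
      omega
    | cons b t' =>
      rw [List.getLast?_cons_cons] at hg
      have hgm : g ∈ b :: t' := by
        have := List.mem_of_getLast? hg
        exact this
      rcases List.mem_cons.1 hx with rfl | hx
      · exact (List.pairwise_cons.1 hp).1 g hgm
      · exact ih (List.pairwise_cons.1 hp).2 x hx g hg

theorem pv_sorted_getLast (ks : List Int) (h : ks ≠ []) :
    (PySem.List.sorted ks (fun x => x)).getLast? = some (pvMaxKs ks) := by
  set l := PySem.List.sorted ks (fun x => x) with hl
  have hlne : l ≠ [] := by
    rw [hl, Ne, PySem.List.sorted_eq_nil_iff]; exact h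
  obtain ⟨g, hg⟩ := Option.ne_none_iff_exists'.1 (mt List.getLast?_eq_none_iff.1 hlne)
  have hgm : g ∈ ks := (PySem.List.mem_sorted ks (fun x => x) false g).1 (List.mem_of_getLast? hg)
  have h1 : g ≤ pvMaxKs ks := pv_maxKs_isMax ks g hgm
  have h2 : pvMaxKs ks ≤ g := by
    apply pv_pairwise_le_getLast l _ _ _ g hg
    · exact PySem.List.sorted_pairwise ks (fun x => x)
    · exact (PySem.List.mem_sorted ks (fun x => x) false _).2 (pv_maxKs_mem ks h)
  rw [hg]; congr 1; omega

theorem pv_last_sorted_max (ks : List Int) (h : ks ≠ []) :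
    PySem.List.pyGetD (PySem.List.sorted ks (fun x => x)) (-1) 0 = pvMaxKs ks := by
  rw [PySem.List.pyGetD, PySem.List.pyGet?_neg_one, pv_sorted_getLast ks h, Option.getD_some]

theorem pv_maxKs_eq_foldl (ks : List Int) (h : ∀ k ∈ ks, 0 ≤ k) :
    ks.foldl max 0 = pvMaxKs ks := by
  cases ks with
  | nil => rfl
  | cons k t =>
    show List.foldl max (max 0 k) t = List.foldl max k t
    rw [max_eq_right (h k List.mem_cons_self)]

theorem pvPrevK_eq (ks : List Int) :
    (ks.filter (fun x => x < pvMaxKs ks)).foldl max 0 = pvPrevK ks := rfl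

theorem pv_loop_eq (t : String) (p : List String) (ks : List Int)
    (HPre : ∀ k ∈ ks, 0 ≤ k) (HnD : ¬ D_maxfrag_k t p ks)
    (lastK : Int) (HlastUb : ∀ x ∈ ks, x ≤ lastK) (HlastEq : lastK = pvMaxKs ks) :
    ∀ (s : List Int) (prev : Int),
      s <:+ PySem.List.sorted ks (fun x => x) →
      (∀ x ∈ ks, x ∈ s ∨ x ≤ prev) →
      0 ≤ prev →
      (prev = 0 ∨ prev ∈ ks) →
      (∀ x ∈ s, prev ≤ x) →
      (∀ q, pvFirstHit (pvTarget t) 0 p = some q → prev ≤ (q : Int)) →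
      pvALoop (pvTarget t) p lastK prev s =
        s.map (fun k => match pvFirstHit (pvTarget t) 0 p with
          | some q => if (q : Int) < k then 1 else 0
          | none => 0) := by
  intro s
  induction s with
  | nil => intro prev _ _ _ _ _ _; rfl
  | cons k rest ih =>
    intro prev Hsuf Hsplit Hprev0 Hprevm Hchain Hpos
    have hkmem : k ∈ ks := by
      have hk : k ∈ PySem.List.sorted ks (fun x => x) := Hsuf.sublist.mem List.mem_cons_self
      exact (PySem.List.mem_sorted ks (fun x => x) false k).1 hk
    have hk0 : 0 ≤ k := HPre k hkmem
    have hprevk : prev ≤ k := Hchain k List.mem_cons_self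
    have hpair : (k :: rest).Pairwise (fun a b => a ≤ b) :=
      List.Pairwise.sublist Hsuf.sublist (PySem.List.sorted_pairwise ks (fun x => x))
    have hrestge : ∀ x ∈ rest, k ≤ x := (List.pairwise_cons.1 hpair).1
    have hocc_eq : ((PySem.List.slice p (some prev) (some k)).map (fun r => pvSplitDot r)).any
          (fun fr => fr.contains (pvTarget t))
        = (PySem.List.slice p (some prev) (some k)).any (pvHit (pvTarget t)) := by
      rw [List.any_map]; rfl
    have hsplit2 : (p.take k.toNat).any (pvHit (pvTarget t)) =
        ((p.take prev.toNat).any (pvHit (pvTarget t)) ||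
          (PySem.List.slice p (some prev) (some k)).any (pvHit (pvTarget t))) :=
      pv_take_any_split p _ Hprev0 hprevk
    -- hypotheses for the recursive call (used in the no-fire branches)
    have Hsuf' : rest <:+ PySem.List.sorted ks (fun x => x) :=
      (List.suffix_cons k rest).trans Hsuf
    have Hsplit' : ∀ x ∈ ks, x ∈ rest ∨ x ≤ k := by
      intro x hx
      rcases Hsplit x hx with hx' | hx'
      · rcases List.mem_cons.1 hx' with rfl | hx''
        · exact Or.inr le_rfl
        · exact Or.inl hx''
      · exact Or.inr (le_trans hx' hprevk)
    cases hpos : pvFirstHit (pvTarget t) 0 p with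
    | none =>
      have h1 : ∀ n : Nat, (p.take n).any (pvHit (pvTarget t)) = false := by
        intro n; rw [pv_fh_take, hpos]
      have hocc : (PySem.List.slice p (some prev) (some k)).any (pvHit (pvTarget t)) = false := by
        have h2 := hsplit2
        rw [h1, h1] at h2
        simpa using h2.symm
      simp only [pvALoop, hocc_eq, hocc, Bool.false_eq_true, ↓reduceIte, List.map_cons, hpos]
      refine congrArg (0 :: ·) ?_
      have := ih k Hsuf' Hsplit' hk0 (Or.inr hkmem) hrestge (by intro q hq; rw [hpos] at hq; cases hq)
      rw [hpos] at this
      exact this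
    | some q =>
      have Hq : prev ≤ (q : Int) := Hpos q hpos
      have h1 : (p.take prev.toNat).any (pvHit (pvTarget t)) = false := by
        rw [pv_fh_take, hpos]
        simp only [decide_eq_false_iff_not]
        omega
      have h2 : (p.take k.toNat).any (pvHit (pvTarget t)) = decide ((q : Int) < k) := by
        rw [pv_fh_take, hpos]
        simp only [decide_eq_decide]
        omega
      have hocc : (PySem.List.slice p (some prev) (some k)).any (pvHit (pvTarget t))
          = decide ((q : Int) < k) := by
        rw [h1, Bool.false_or] at hsplit2
        rw [← hsplit2, h2]
      by_cases hqk : (q : Int) < k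
      · have hocc' : (PySem.List.slice p (some prev) (some k)).any (pvHit (pvTarget t)) = true := by
          rw [hocc]; exact decide_eq_true hqk
        simp only [pvALoop, hocc_eq, hocc', ↓reduceIte, List.map_cons, hpos, hqk]
        refine congrArg (1 :: ·) ?_
        have htail : rest.map (fun x => if (q : Int) < x then (1 : Int) else 0)
            = List.replicate rest.length 1 := by
          rw [List.eq_replicate_iff]
          refine ⟨by simp, ?_⟩
          intro b hb
          obtain ⟨x, hx, rfl⟩ := List.mem_map.1 hb
          rw [if_pos (lt_of_lt_of_le hqk (hrestge x hx))]
        split_ifs with hkl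
        · exact htail.symm
        · -- k is the (duplicated) maximum and the hit lies in its segment: this is D_, excluded
          cases rest with
          | nil => simp
          | cons r0 rest' =>
            exfalso
            have hklast : k ≤ lastK := HlastUb k hkmem
            have hkm : k = pvMaxKs ks := by omega
            have hr0mem : r0 ∈ ks := by
              have hr : r0 ∈ PySem.List.sorted ks (fun x => x) :=
                Hsuf.sublist.mem (List.mem_cons_of_mem _ List.mem_cons_self)
              exact (PySem.List.mem_sorted ks (fun x => x) false r0).1 hr
            have hr0 : r0 = pvMaxKs ks := by
              have h3 := hrestge r0 List.mem_cons_self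
              have h4 := HlastUb r0 hr0mem
              omega
            have hcnt : 1 < ks.count (pvMaxKs ks) := by
              have hsub : (k :: r0 :: rest').Sublist (PySem.List.sorted ks (fun x => x)) :=
                Hsuf.sublist
              have hc1 : (k :: r0 :: rest').count (pvMaxKs ks) ≤
                  (PySem.List.sorted ks (fun x => x)).count (pvMaxKs ks) :=
                hsub.count_le _
              have hc2 : (PySem.List.sorted ks (fun x => x)).count (pvMaxKs ks) = ks.count (pvMaxKs ks) :=
                (PySem.List.sorted_perm ks (fun x => x) false).count_eq _
              have hc3 : 2 ≤ (k :: r0 :: rest').count (pvMaxKs ks) := by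
                rw [hkm, hr0, List.count_cons_self, List.count_cons_self]
                omega
              omega
            obtain ⟨hqlen, hqmem, hqpre⟩ := pv_fh_spec (pvTarget t) p q hpos
            apply HnD
            show D_maxfrag_k t p ks
            unfold D_maxfrag_k
            simp only [pv_maxKs_eq_foldl ks HPre]
            refine ⟨hcnt, ⟨p.getD q "", ?_, ?_⟩, ?_⟩
            · rw [← hkm, List.getD_eq_getElem _ _ hqlen]
              refine List.mem_iff_getElem.2 ⟨q, by simp; omega, ?_⟩
              rw [List.getElem_take]
            · show pvTarget t ∈ pvSplitDot (p.getD q "")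
              simpa [pvHit, pvSplitDot, List.contains_eq_mem] using hqmem
            · intro k' hk'ks hk'm r hr
              rw [← hkm] at hk'm
              have hk'prev : k' ≤ prev := by
                rcases Hsplit k' hk'ks with hin | hle
                · exfalso
                  rcases List.mem_cons.1 hin with rfl | hin'
                  · omega
                  · have := hrestge _ hin'; omega
                · exact hle
              obtain ⟨b, hb, hbr⟩ := List.mem_iff_getElem.1 hr
              obtain rfl : r = p.getD b "" := pv_mem_of_getD_take p k'.toNat b hb r hbr
              have hbq : b < q := by
                have := hb; simp at this; omega
              have hfalse := hqpre b hbq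
              show pvTarget t ∉ pvSplitDot (p.getD b "")
              intro hmem
              have hT : pvHit (pvTarget t) (p.getD b "") = true := by
                simpa [pvHit, pvSplitDot, List.contains_eq_mem] using hmem
              rw [hfalse] at hT
              cases hT
      · have hocc' : (PySem.List.slice p (some prev) (some k)).any (pvHit (pvTarget t)) = false := by
          rw [hocc]; exact decide_eq_false hqk
        simp only [pvALoop, hocc_eq, hocc', Bool.false_eq_true, ↓reduceIte, List.map_cons, hpos, hqk]
        refine congrArg (0 :: ·) ?_
        have := ih k Hsuf' Hsplit' hk0 (Or.inr hkmem) hrestge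
          (by intro q' hq'; rw [hpos] at hq'; injection hq' with e; subst e; omega)
        rw [hpos] at this
        exact this

theorem pv_loop_length (tgt : String) (p : List String) (lastK : Int) :
    ∀ (s : List Int) (prev : Int), (pvALoop tgt p lastK prev s).length = s.length := by
  intro s
  induction s with
  | nil => intro prev; rfl
  | cons k rest ih =>
    intro prev
    simp only [pvALoop]
    split_ifs <;> simp [ih k]

theorem pv_loop_last (t : String) (p : List String) (ks : List Int)
    (HPre : ∀ k ∈ ks, 0 ≤ k) (q : Nat)
    (hq : pvFirstHit (pvTarget t) 0 p = some q) (hqm : (q : Int) < pvMaxKs ks)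
    (hts : pvPrevK ks ≤ (q : Int)) :
    ∀ (s : List Int) (prev : Int),
      s <:+ PySem.List.sorted ks (fun x => x) →
      0 ≤ prev →
      (∀ x ∈ s, prev ≤ x) →
      prev ≤ (q : Int) →
      2 ≤ s.count (pvMaxKs ks) →
      (pvALoop (pvTarget t) p (pvMaxKs ks) prev s).getLast? = some 0 := by
  intro s
  induction s with
  | nil =>
    intro prev _ _ _ _ hcnt
    rw [List.count_nil] at hcnt
    omega
  | cons k rest ih =>
    intro prev Hsuf Hprev0 Hchain Hq hcnt
    have hkmem : k ∈ ks := by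
      have hk : k ∈ PySem.List.sorted ks (fun x => x) := Hsuf.sublist.mem List.mem_cons_self
      exact (PySem.List.mem_sorted ks (fun x => x) false k).1 hk
    have hk0 : 0 ≤ k := HPre k hkmem
    have hprevk : prev ≤ k := Hchain k List.mem_cons_self
    have hpair : (k :: rest).Pairwise (fun a b => a ≤ b) :=
      List.Pairwise.sublist Hsuf.sublist (PySem.List.sorted_pairwise ks (fun x => x))
    have hrestge : ∀ x ∈ rest, k ≤ x := (List.pairwise_cons.1 hpair).1
    have hocc_eq : ((PySem.List.slice p (some prev) (some k)).map (fun r => pvSplitDot r)).any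
          (fun fr => fr.contains (pvTarget t))
        = (PySem.List.slice p (some prev) (some k)).any (pvHit (pvTarget t)) := by
      rw [List.any_map]; rfl
    have hsplit2 : (p.take k.toNat).any (pvHit (pvTarget t)) =
        ((p.take prev.toNat).any (pvHit (pvTarget t)) ||
          (PySem.List.slice p (some prev) (some k)).any (pvHit (pvTarget t))) :=
      pv_take_any_split p _ Hprev0 hprevk
    have h1 : (p.take prev.toNat).any (pvHit (pvTarget t)) = false := by
      rw [pv_fh_take, hq]
      simp only [decide_eq_false_iff_not]
      omega
    have h2 : (p.take k.toNat).any (pvHit (pvTarget t)) = decide ((q : Int) < k) := by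
      rw [pv_fh_take, hq]
      simp only [decide_eq_decide]
      omega
    have hocc : (PySem.List.slice p (some prev) (some k)).any (pvHit (pvTarget t))
        = decide ((q : Int) < k) := by
      rw [h1, Bool.false_or] at hsplit2
      rw [← hsplit2, h2]
    by_cases hqk : (q : Int) < k
    · have hocc' : (PySem.List.slice p (some prev) (some k)).any (pvHit (pvTarget t)) = true := by
        rw [hocc]; exact decide_eq_true hqk
      have hkub : k ≤ pvMaxKs ks := pv_maxKs_isMax ks k hkmem
      have hkm : k = pvMaxKs ks := by
        by_contra hne'
        have hklt : k < pvMaxKs ks := by omega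
        have hkfil : k ∈ ks.filter (fun x => x < pvMaxKs ks) :=
          List.mem_filter.2 ⟨hkmem, by simpa using hklt⟩
        have h5 : k ≤ pvPrevK ks := by
          rw [pvPrevK]
          exact (PySem.List.le_foldl_max (ks.filter (fun x => x < pvMaxKs ks)) 0).2 k hkfil
        omega
      have hnotlt : ¬ (k < pvMaxKs ks) := by omega
      simp only [pvALoop, hocc_eq, hocc', ↓reduceIte, hnotlt]
      have hrest : rest.count (pvMaxKs ks) ≥ 1 := by
        rw [hkm, List.count_cons_self] at hcnt
        omega
      cases rest with
      | nil => simp at hrest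
      | cons r0 rest' =>
        have hlen : (r0 :: rest').length = rest'.length + 1 := rfl
        rw [hlen, List.replicate_succ, List.getLast?_cons_cons, ← List.replicate_succ,
          List.getLast?_replicate]
        simp
    · have hocc' : (PySem.List.slice p (some prev) (some k)).any (pvHit (pvTarget t)) = false := by
        rw [hocc]; exact decide_eq_false hqk
      have hkm : k ≠ pvMaxKs ks := by omega
      have hcnt' : 2 ≤ rest.count (pvMaxKs ks) := by
        rw [List.count_cons_of_ne (by omega) ] at hcnt
        exact hcnt
      have hrestne : rest ≠ [] := by
        intro he; rw [he] at hcnt'; simp at hcnt'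
      simp only [pvALoop, hocc_eq, hocc', Bool.false_eq_true, ↓reduceIte]
      have htail := ih k ((List.suffix_cons k rest).trans Hsuf) hk0 hrestge (by omega) hcnt'
      have hne2 : pvALoop (pvTarget t) p (pvMaxKs ks) k rest ≠ [] := by
        intro he
        have := pv_loop_length (pvTarget t) p (pvMaxKs ks) rest k
        rw [he] at this
        exact hrestne (List.length_eq_zero_iff.1 this.symm)
      cases hl : pvALoop (pvTarget t) p (pvMaxKs ks) k rest with
      | nil => exact absurd hl hne2
      | cons y ys =>
        rw [List.getLast?_cons_cons, ← hl, htail]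

-- ===== VERDICT (by name: the statement is the Claim_ definition above) =====
theorem maxfrag_k_spec : Claim_unchanged_maxfrag_k := by
  intro t p ks _ hpre
  unfold Spec_maxfrag_k
  intro hnd
  show maxfrag_k t p ks = maxfrag_k_alt t p ks
  simp only [maxfrag_k, maxfrag_k_alt]
  rw [pv_target_eq t]
  rcases eq_or_ne ks [] with rfl | hne
  · rfl
  · rw [pv_last_sorted_max ks hne,
      pv_loop_eq t p ks hpre hnd (pvMaxKs ks) (pv_maxKs_isMax ks) rfl
        (PySem.List.sorted ks (fun x => x)) 0
        (List.suffix_refl _)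
        (fun x hx => Or.inl ((PySem.List.mem_sorted ks (fun x => x) false x).2 hx))
        le_rfl
        (Or.inl rfl)
        (fun x hx => hpre x ((PySem.List.mem_sorted ks (fun x => x) false x).1 hx))
        (fun q _ => Int.natCast_nonneg q)]
    apply List.map_congr_left
    intro x _
    cases pvFirstHit (pvTarget t) 0 p <;> rfl

theorem maxfrag_k_changed : Claim_changed_maxfrag_k := by
  unfold Claim_changed_maxfrag_k; decide

theorem maxfrag_k_tight : Claim_exact_maxfrag_k := by
  unfold Claim_exact_maxfrag_k
  intro t p ks _ hpre hD
  unfold D_maxfrag_k at hD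
  simp only [pv_maxKs_eq_foldl ks hpre] at hD
  obtain ⟨hcnt, ⟨r, hrw, hrin⟩, hmiss⟩ := hD
  have hrin' : pvTarget t ∈ pvSplitDot r := hrin
  have hne : ks ≠ [] := by
    intro h; rw [h] at hcnt; simp at hcnt
  have hm0 : 0 ≤ pvMaxKs ks := hpre _ (pv_maxKs_mem ks hne)
  have ht00 : 0 ≤ pvPrevK ks := (PySem.List.le_foldl_max _ 0).1
  have hmiss' : (p.take (pvPrevK ks).toNat).any (pvHit (pvTarget t)) = false := by
    by_contra hcon
    rw [Bool.not_eq_false, List.any_eq_true] at hcon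
    obtain ⟨x, hxmem, hx⟩ := hcon
    rcases PySem.List.foldl_max_mem (ks.filter (fun y => y < pvMaxKs ks)) 0 with he | he
    · rw [pvPrevK, he] at hxmem
      simp at hxmem
    · have hf := List.mem_filter.1 he
      have hlt : pvPrevK ks < pvMaxKs ks := by
        have := hf.2
        rw [pvPrevK]
        simpa using this
      have hfks : pvPrevK ks ∈ ks := by
        have := hf.1
        rwa [pvPrevK_eq] at this
      refine hmiss (pvPrevK ks) hfks hlt x hxmem ?_
      simpa [pvHit, pvSplitDot, List.contains_eq_mem] using hx
  have hhit' : (p.take (pvMaxKs ks).toNat).any (pvHit (pvTarget t)) = true := by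
    refine List.any_eq_true.2 ⟨r, hrw, ?_⟩
    simpa [pvHit, pvSplitDot, List.contains_eq_mem] using hrin'
  obtain ⟨q, hq, hqlt⟩ : ∃ q, pvFirstHit (pvTarget t) 0 p = some q ∧ (q : Int) < pvMaxKs ks := by
    rw [pv_fh_take] at hhit'
    cases hfh : pvFirstHit (pvTarget t) 0 p with
    | none => rw [hfh] at hhit'; simp at hhit'
    | some q =>
      rw [hfh] at hhit'
      simp only [decide_eq_true_eq] at hhit'
      exact ⟨q, rfl, by omega⟩
  have hts : pvPrevK ks ≤ (q : Int) := by
    rw [pv_fh_take, hq] at hmiss'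
    simp only [decide_eq_false_iff_not] at hmiss'
    omega
  intro heq
  have hA : (maxfrag_k t p ks).getLast? = some 0 := by
    simp only [maxfrag_k]
    rw [pv_target_eq t, pv_last_sorted_max ks hne]
    exact pv_loop_last t p ks hpre q hq hqlt hts (PySem.List.sorted ks (fun x => x)) 0
      (List.suffix_refl _)
      le_rfl
      (fun x hx => hpre x ((PySem.List.mem_sorted ks (fun x => x) false x).1 hx))
      (Int.natCast_nonneg q)
      (by
        rw [(PySem.List.sorted_perm ks (fun x => x) false).count_eq]
        omega)
  have hB : (maxfrag_k_alt t p ks).getLast? = some 1 := by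
    simp only [maxfrag_k_alt, hq]
    rw [List.getLast?_map, pv_sorted_getLast ks hne]
    simp [hqlt]
  rw [heq, hB] at hA
  simp at hA
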